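-- pv_equiv track=rewrite | github.com/heggria/Hermit | src/hermit/plugins/builtin/hooks/decompose/llm_spec_generator.py | _infer_trust_zone
-- ===== SOURCE A (Python) =====
-- def _infer_trust_zone(file_plan: list[dict[str, str]]) -> str:
--     """Infer trust zone from file paths when LLM output is missing or invalid."""
--     sensitive_patterns = ("policy", "security", "auth", "trust", "governance")
--     critical_patterns = ("execution", "ledger", "proof", "receipt", "verification")
--
--     for entry in file_plan:
--         path = entry.get("path", "").lower()
--         if any(p in path for p in critical_patterns):
--             return "critical"
--
--     for entry in file_plan:
--         path = entry.get("path", "").lower()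
--         if any(p in path for p in sensitive_patterns):
--             return "sensitive"
--
--     return "normal"
-- ===== SOURCE B (Python) =====
-- def _infer_trust_zone(file_plan: list[dict[str, str]]) -> str:
--     """Infer trust zone from file paths when LLM output is missing or invalid."""
--     sensitive_patterns = ("policy", "security", "auth", "trust", "governance")
--     critical_patterns = ("execution", "ledger", "proof", "receipt", "verification")
--
--     seen_sensitive = False
--     for entry in file_plan:
--         path = entry.get("path", "").lower()
--         if any(p in path for p in critical_patterns):
--             return "critical"
--         if any(p in path for p in sensitive_patterns):
--             seen_sensitive = True
--     return "sensitive" if seen_sensitive else "normal"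
-- ===== Notes on version B (the rewrite author's own statement) =====
-- stated objective: simpler
-- what changed: Replaced A's two full scans over file_plan by a single pass that short-circuits on a critical match and carries a seen-sensitive flag, so each path is lowercased and pattern-matched once instead of up to twice.
import Mathlib
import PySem

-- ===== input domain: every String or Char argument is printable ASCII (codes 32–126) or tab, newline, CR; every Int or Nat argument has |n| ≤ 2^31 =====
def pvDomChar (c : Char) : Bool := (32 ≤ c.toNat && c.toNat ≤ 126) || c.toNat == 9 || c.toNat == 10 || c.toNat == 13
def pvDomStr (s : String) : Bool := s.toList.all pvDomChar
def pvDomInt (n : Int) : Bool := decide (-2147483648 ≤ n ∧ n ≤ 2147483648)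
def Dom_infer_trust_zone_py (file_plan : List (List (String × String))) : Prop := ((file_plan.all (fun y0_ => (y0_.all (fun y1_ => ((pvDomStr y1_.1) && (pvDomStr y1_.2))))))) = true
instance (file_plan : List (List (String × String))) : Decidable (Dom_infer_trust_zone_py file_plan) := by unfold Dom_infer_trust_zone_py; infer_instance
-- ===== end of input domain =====

-- ===== PORT A =====
-- B changes: A scans file_plan twice (critical pass, then sensitive pass); B makes one pass
-- with a seen-sensitive flag, short-circuiting on critical. Objective: simpler (return value only).

-- entry.get("path", "").lower()  (association list, first match = Python dict lookup convention)
def pvPath (entry : List (String × String)) : String :=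
  PySem.Str.lower (((entry.find? (fun kv => kv.1 == "path")).map (·.2)).getD "")

def pvSensitive : List String := ["policy", "security", "auth", "trust", "governance"]
def pvCritical : List String := ["execution", "ledger", "proof", "receipt", "verification"]

-- any(p in path for p in pats)
def pvHit (pats : List String) (path : String) : Bool :=
  pats.any (fun p => PySem.Str.isIn p path)

-- first loop: return "critical" at the first critical match
def pvLoopA1 : List (List (String × String)) → Option String
  | [] => none
  | entry :: rest =>
      if pvHit pvCritical (pvPath entry) then some "critical" else pvLoopA1 rest

-- second loop: return "sensitive" at the first sensitive match
def pvLoopA2 : List (List (String × String)) → Option String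
  | [] => none
  | entry :: rest =>
      if pvHit pvSensitive (pvPath entry) then some "sensitive" else pvLoopA2 rest

def infer_trust_zone_py (file_plan : List (List (String × String))) : String :=
  match pvLoopA1 file_plan with
  | some r => r
  | none =>
    match pvLoopA2 file_plan with
    | some r => r
    | none => "normal"

-- ===== PORT B =====
-- single pass carrying the seen_sensitive flag
def pvLoopB : List (List (String × String)) → Bool → String
  | [], seen => if seen then "sensitive" else "normal"
  | entry :: rest, seen =>
      let path := pvPath entry
      if pvHit pvCritical path then "critical"
      else pvLoopB rest (if pvHit pvSensitive path then true else seen)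

def infer_trust_zone_py_alt (file_plan : List (List (String × String))) : String :=
  pvLoopB file_plan false

-- ===== PRECONDITION & SPEC =====
def Spec_infer_trust_zone_py (file_plan : List (List (String × String))) (out : String) : Prop := out = infer_trust_zone_py_alt file_plan
instance (file_plan : List (List (String × String))) (out : String) : Decidable (Spec_infer_trust_zone_py file_plan out) := by unfold Spec_infer_trust_zone_py; infer_instance

-- ===== CLAIM (what is proved, stated in full; the proofs are below) =====
def Claim_equal_infer_trust_zone_py : Prop := ∀ (file_plan : List (List (String × String))), Dom_infer_trust_zone_py file_plan → Spec_infer_trust_zone_py file_plan (infer_trust_zone_py file_plan)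

-- ===== LEMMAS AND PROOFS =====

lemma pvLoopA1_eq (fp : List (List (String × String))) :
    pvLoopA1 fp = if fp.any (fun e => pvHit pvCritical (pvPath e)) then some "critical" else none := by
  induction fp with
  | nil => simp [pvLoopA1]
  | cons e rest ih =>
    by_cases h : pvHit pvCritical (pvPath e) <;> simp [pvLoopA1, h, ih]

lemma pvLoopA2_eq (fp : List (List (String × String))) :
    pvLoopA2 fp = if fp.any (fun e => pvHit pvSensitive (pvPath e)) then some "sensitive" else none := by
  induction fp with
  | nil => simp [pvLoopA2]
  | cons e rest ih =>
    by_cases h : pvHit pvSensitive (pvPath e) <;> simp [pvLoopA2, h, ih]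

lemma pvLoopB_eq (fp : List (List (String × String))) (seen : Bool) :
    pvLoopB fp seen =
      if fp.any (fun e => pvHit pvCritical (pvPath e)) then "critical"
      else if seen || fp.any (fun e => pvHit pvSensitive (pvPath e)) then "sensitive"
      else "normal" := by
  induction fp generalizing seen with
  | nil => simp [pvLoopB]
  | cons e rest ih =>
    by_cases hc : pvHit pvCritical (pvPath e)
    · simp [pvLoopB, hc]
    · by_cases hs : pvHit pvSensitive (pvPath e) <;> simp [pvLoopB, hc, hs, ih]

-- ===== VERDICT (by name: the statement is the Claim_ definition above) =====
theorem infer_trust_zone_py_spec : Claim_equal_infer_trust_zone_py := by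
  intro fp _
  unfold Spec_infer_trust_zone_py infer_trust_zone_py infer_trust_zone_py_alt
  rw [pvLoopA1_eq, pvLoopA2_eq, pvLoopB_eq]
  by_cases hc : fp.any (fun e => pvHit pvCritical (pvPath e)) <;>
    by_cases hs : fp.any (fun e => pvHit pvSensitive (pvPath e)) <;>
    simp [hc, hs]
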